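-- pv_equiv track=rewrite | github.com/TheSkyC/LexiSync | services/format_manager.py | _detect_indent
-- ===== SOURCE A (Python) =====
-- def _detect_indent(json_content: str) -> int:
--     """检测 JSON 文件的缩进空格数"""
--     lines = json_content.split('\n')
--     for line in lines[1:]:  # 跳过第一行
--         stripped = line.lstrip()
--         if stripped and line != stripped:
--             indent = len(line) - len(stripped)
--             if indent > 0:
--                 return indent
--     return 2  # 默认 2 空格
-- ===== SOURCE B (Python) =====
-- def _detect_indent(json_content: str) -> int:
--     """检测 JSON 文件的缩进空格数"""
--     s = json_content
--     n = len(s)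
--     i = 0
--     while i < n:
--         if s[i] == '\n':
--             j = i + 1
--             while j < n and s[j].isspace() and s[j] != '\n':
--                 j += 1
--             if j > i + 1 and j < n and not s[j].isspace():
--                 return j - i - 1
--         i += 1
--     return 2
-- ===== Notes on version B (the rewrite author's own statement) =====
-- stated objective: alternative
-- what changed: B replaces A's split-into-lines-then-lstrip-each-line pass with a single index scan over the raw string that measures the whitespace run right after each newline, building no intermediate list of lines.
import Mathlib
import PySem

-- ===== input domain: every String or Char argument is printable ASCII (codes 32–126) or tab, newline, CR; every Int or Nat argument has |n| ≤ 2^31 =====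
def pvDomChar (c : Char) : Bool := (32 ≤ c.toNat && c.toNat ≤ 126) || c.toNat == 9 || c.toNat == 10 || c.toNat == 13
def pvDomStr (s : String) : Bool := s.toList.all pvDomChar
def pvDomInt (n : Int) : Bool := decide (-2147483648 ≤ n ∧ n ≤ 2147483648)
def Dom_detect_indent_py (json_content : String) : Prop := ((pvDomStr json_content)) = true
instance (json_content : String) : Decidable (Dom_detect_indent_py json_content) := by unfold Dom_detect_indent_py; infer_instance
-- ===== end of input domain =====

-- B scans the raw character sequence once, measuring the whitespace run after each newline,
-- instead of A's split-into-lines + per-line lstrip; same cost class, no list of lines built.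

-- ===== PORT A =====
-- the 'for line in lines[1:]' loop of A
def detectIndentLoopA : List (List Char) → Int
  | [] => 2
  | line :: rest =>
    let stripped := PySem.Chars.lstrip line
    if stripped ≠ [] ∧ line ≠ stripped then
      let indent : Int := (line.length : Int) - (stripped.length : Int)
      if indent > 0 then indent else detectIndentLoopA rest
    else detectIndentLoopA rest

def detect_indent_py (json_content : String) : Int :=
  let lines := PySem.Chars.splitOn json_content.toList ['\n']
  detectIndentLoopA (PySem.List.slice lines (some 1) none)

-- ===== PORT B =====
-- inner while loop of Source B: length of the leading run of non-newline whitespace (j - i - 1)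
def pvRunWS : List Char → Nat
  | [] => 0
  | c :: rest => if PySem.Chars.isspace c = true ∧ c ≠ '\n' then pvRunWS rest + 1 else 0

-- outer while loop of Source B, one step per index i
def pvScanB : List Char → Int
  | [] => 2
  | c :: rest =>
    if c = '\n' then
      let k := pvRunWS rest
      match rest.drop k with
      | d :: _ => if 0 < k ∧ ¬ (PySem.Chars.isspace d = true) then (k : Int) else pvScanB rest
      | [] => pvScanB rest
    else pvScanB rest

def detect_indent_py_alt (json_content : String) : Int := pvScanB json_content.toList

-- ===== PRECONDITION & SPEC =====
def Spec_detect_indent_py (json_content : String) (out : Int) : Prop := out = detect_indent_py_alt json_content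
instance (json_content : String) (out : Int) : Decidable (Spec_detect_indent_py json_content out) := by unfold Spec_detect_indent_py; infer_instance

-- ===== CLAIM (what is proved, stated in full; the proofs are below) =====
def Claim_equal_detect_indent_py : Prop := ∀ (json_content : String), Dom_detect_indent_py json_content → Spec_detect_indent_py json_content (detect_indent_py json_content)

-- ===== LEMMAS AND PROOFS =====

-- structural description of split('\n')
def mySplit : List Char → List (List Char)
  | [] => [[]]
  | c :: cs =>
    if c = '\n' then [] :: mySplit cs
    else
      match mySplit cs with
      | h :: t => (c :: h) :: t
      | [] => [[c]]

theorem mySplit_ne_nil (cs : List Char) : mySplit cs ≠ [] := by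
  cases cs with
  | nil => simp [mySplit]
  | cons c cs =>
    simp only [mySplit]
    split
    · simp
    · split <;> simp

theorem mySplit_cons_headI_tail (cs : List Char) :
    (mySplit cs).headI :: (mySplit cs).tail = mySplit cs := by
  cases hm : mySplit cs with
  | nil => exact absurd hm (mySplit_ne_nil cs)
  | cons h t => simp

theorem splitOn_go_eq (fuel : Nat) :
    ∀ (l cur : List Char) (acc : List (List Char)), l.length ≤ fuel →
      PySem.Chars.splitOn.go ['\n'] fuel l cur acc =
        acc.reverse ++ (cur.reverse ++ (mySplit l).headI) :: (mySplit l).tail := by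
  induction fuel with
  | zero =>
    intro l cur acc h
    have : l = [] := by cases l <;> simp_all
    subst this
    simp [PySem.Chars.splitOn.go, mySplit]
  | succ fuel ih =>
    intro l cur acc h
    cases l with
    | nil => simp [PySem.Chars.splitOn.go, mySplit]
    | cons c rest =>
      by_cases hc : c = '\n'
      · subst hc
        have hpre : List.isPrefixOf ['\n'] ('\n' :: rest) = true := by
          simp [List.isPrefixOf]
        rw [PySem.Chars.splitOn.go]
        simp only [hpre, if_pos, List.length_cons, List.length_nil, List.drop_succ_cons, List.drop_zero]
        rw [ih rest [] (List.reverse cur :: acc) (by simpa using Nat.le_of_succ_le_succ h)]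
        simp [mySplit, mySplit_cons_headI_tail]
      · have hpre : List.isPrefixOf ['\n'] (c :: rest) = false := by
          simp [List.isPrefixOf]
          intro h; exact absurd h.symm hc
        rw [PySem.Chars.splitOn.go]
        simp only [hpre, Bool.false_eq_true, if_false]
        rw [ih rest (c :: cur) acc (by simpa using Nat.le_of_succ_le_succ h)]
        have hne := mySplit_ne_nil rest
        cases hm : mySplit rest with
        | nil => exact absurd hm hne
        | cons hHead t =>
          simp [mySplit, hc, hm]

theorem splitOn_eq_mySplit (cs : List Char) :
    PySem.Chars.splitOn cs ['\n'] = mySplit cs := by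
  have h := splitOn_go_eq (cs.length + 1) cs [] [] (by omega)
  have hne := mySplit_ne_nil cs
  cases hm : mySplit cs with
  | nil => exact absurd hm hne
  | cons hHead t =>
    simp [PySem.Chars.splitOn, hm] at h ⊢
    simpa using h

-- head of mySplit is the first line
theorem mySplit_head (cs : List Char) :
    (mySplit cs).headI = cs.takeWhile (· ≠ '\n') := by
  induction cs with
  | nil => simp [mySplit]
  | cons c cs ih =>
    by_cases hc : c = '\n'
    · subst hc; simp [mySplit, List.takeWhile]
    · have hne := mySplit_ne_nil cs
      cases hm : mySplit cs with
      | nil => exact absurd hm hne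
      | cons h t =>
        simp [mySplit, hc, List.takeWhile, hm] at ih ⊢
        exact ih

-- maximality of the whitespace run
theorem runWS_head_not_ws (cs : List Char) (d : Char) (r : List Char)
    (h : cs.drop (pvRunWS cs) = d :: r) :
    ¬ (PySem.Chars.isspace d = true ∧ d ≠ '\n') := by
  induction cs with
  | nil => simp at h
  | cons c cs ih =>
    by_cases hw : PySem.Chars.isspace c = true ∧ c ≠ '\n'
    · simp [pvRunWS, hw] at h
      exact ih h
    · simp [pvRunWS, hw] at h
      obtain ⟨h1, h2⟩ := h
      subst h1
      exact hw

-- lstrip of the first line is the tail line content after the run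
theorem lstrip_takeWhile (cs : List Char) :
    PySem.Chars.lstrip (cs.takeWhile (· ≠ '\n')) =
      (cs.drop (pvRunWS cs)).takeWhile (· ≠ '\n') := by
  induction cs with
  | nil => simp [PySem.Chars.lstrip]
  | cons c cs ih =>
    by_cases hc : c = '\n'
    · subst hc
      simp [pvRunWS, List.takeWhile, PySem.Chars.lstrip]
    · by_cases hs : PySem.Chars.isspace c = true
      · have hw : PySem.Chars.isspace c = true ∧ c ≠ '\n' := ⟨hs, hc⟩
        simp [pvRunWS, hw, List.takeWhile, PySem.Chars.lstrip] at ih ⊢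
        exact ih
      · simp [pvRunWS, List.takeWhile, hc, PySem.Chars.lstrip, hs]

-- length bookkeeping: the first line splits as run ++ rest-of-line
theorem takeWhile_length_eq (cs : List Char) :
    (cs.takeWhile (· ≠ '\n')).length =
      pvRunWS cs + ((cs.drop (pvRunWS cs)).takeWhile (· ≠ '\n')).length := by
  induction cs with
  | nil => simp [pvRunWS]
  | cons c cs ih =>
    by_cases hc : c = '\n'
    · subst hc; simp [pvRunWS, List.takeWhile]
    · by_cases hs : PySem.Chars.isspace c = true
      · have hw : PySem.Chars.isspace c = true ∧ c ≠ '\n' := ⟨hs, hc⟩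
        simp [pvRunWS, hw, List.takeWhile] at ih ⊢
        omega
      · simp [pvRunWS, hs, List.takeWhile, hc]

-- the body of A's loop on the line starting the input equals B's newline-step
theorem loopA_step (cs : List Char) :
    detectIndentLoopA (mySplit cs) =
      (match cs.drop (pvRunWS cs) with
        | d :: _ =>
          if 0 < pvRunWS cs ∧ ¬ (PySem.Chars.isspace d = true) then ((pvRunWS cs : Nat) : Int)
          else detectIndentLoopA ((mySplit cs).tail)
        | [] => detectIndentLoopA ((mySplit cs).tail)) := by
  cases cs with
  | nil => simp [mySplit, detectIndentLoopA, pvRunWS, PySem.Chars.lstrip]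
  | cons c cs =>
    by_cases hc : c = '\n'
    · subst hc
      have hsp : PySem.Chars.isspace '\n' = true := by decide
      simp [mySplit, detectIndentLoopA, pvRunWS, PySem.Chars.lstrip, hsp]
    · cases hm : mySplit cs with
      | nil => exact absurd hm (mySplit_ne_nil cs)
      | cons h t =>
        have hh : h = cs.takeWhile (· ≠ '\n') := by
          have hx := mySplit_head cs; rw [hm] at hx; simpa using hx
        by_cases hs : PySem.Chars.isspace c = true
        · -- c is whitespace but not newline: it joins the run
          have hw : PySem.Chars.isspace c = true ∧ c ≠ '\n' := ⟨hs, hc⟩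
          have hstr : PySem.Chars.lstrip (c :: h) = (cs.drop (pvRunWS cs)).takeWhile (fun x => decide (x ≠ '\n')) := by
            have := lstrip_takeWhile cs
            rw [hh]
            simpa [PySem.Chars.lstrip, hs] using this
          have hrun : pvRunWS (c :: cs) = pvRunWS cs + 1 := by simp [pvRunWS, hw]
          have hmc : mySplit (c :: cs) = (c :: h) :: t := by simp [mySplit, hc, hm]
          rw [hmc, hrun]
          simp only [List.drop_succ_cons, List.tail_cons]
          cases hd : cs.drop (pvRunWS cs) with
          | nil =>
            have hnil : PySem.Chars.lstrip (c :: h) = [] := by rw [hstr, hd]; rfl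
            simp [detectIndentLoopA, hnil]
          | cons d r =>
            by_cases hsd : PySem.Chars.isspace d = true
            · -- d is whitespace; by maximality of the run it must be a newline
              have hdn : d = '\n' := by
                have := runWS_head_not_ws cs d r hd
                by_contra hne
                exact this ⟨hsd, hne⟩
              have hnil : PySem.Chars.lstrip (c :: h) = [] := by
                rw [hstr, hd, hdn]; rfl
              simp [detectIndentLoopA, hnil, hsd]
            · -- d is not whitespace: A returns the indent, B returns the run length
              have hdn : d ≠ '\n' := by
                intro hdeq; exact hsd (hdeq ▸ (by decide : PySem.Chars.isspace '\n' = true))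
              have hstr2 : PySem.Chars.lstrip (c :: h) = d :: r.takeWhile (fun x => decide (x ≠ '\n')) := by
                rw [hstr, hd]; simp [List.takeWhile, hdn]
              have hlen : h.length = pvRunWS cs + (PySem.Chars.lstrip (c :: h)).length := by
                rw [hstr, hh]
                exact takeWhile_length_eq cs
              have hne2 : c :: h ≠ PySem.Chars.lstrip (c :: h) := by
                intro heq
                have : (c :: h).length = (PySem.Chars.lstrip (c :: h)).length := by rw [← heq]
                simp at this
                omega
              have hnn : PySem.Chars.lstrip (c :: h) ≠ [] := by rw [hstr2]; simp
              simp only [detectIndentLoopA, if_pos (And.intro hnn hne2)]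
              have hpos : (0:Int) < (c :: h).length - (PySem.Chars.lstrip (c :: h)).length := by
                simp only [List.length_cons]
                omega
              simp only [if_pos hpos, hsd, Bool.false_eq_true, not_false_iff, and_true,
                if_pos (Nat.succ_pos (pvRunWS cs))]
              have hlc : ((c :: h).length : Int) = (h.length : Int) + 1 := by
                simp
              rw [hlc, hlen]
              push_cast
              ring
        · -- c is not whitespace: the first line has no leading whitespace
          have hw : ¬ (PySem.Chars.isspace c = true ∧ c ≠ '\n') := by tauto
          have hrun : pvRunWS (c :: cs) = 0 := by simp [pvRunWS, hs]
          have hmc : mySplit (c :: cs) = (c :: h) :: t := by simp [mySplit, hc, hm]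
          have hstr : PySem.Chars.lstrip (c :: h) = c :: h := by
            simp [PySem.Chars.lstrip, hs]
          rw [hmc, hrun]
          simp [detectIndentLoopA, hstr]

-- the main correspondence between A's remaining-lines loop and B's scan
theorem main_corr (cs : List Char) :
    detectIndentLoopA ((mySplit cs).tail) = pvScanB cs := by
  induction cs with
  | nil => simp [mySplit, detectIndentLoopA, pvScanB]
  | cons c cs ih =>
    by_cases hc : c = '\n'
    · subst hc
      have hmc : (mySplit ('\n' :: cs)).tail = mySplit cs := by simp [mySplit]
      rw [hmc, loopA_step]
      show _ = pvScanB ('\n' :: cs)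
      simp only [pvScanB]
      cases hd : cs.drop (pvRunWS cs) with
      | nil => simpa using ih
      | cons d r => rw [ih]; simp
    · cases hm : mySplit cs with
      | nil => exact absurd hm (mySplit_ne_nil cs)
      | cons h t =>
        have hmc : (mySplit (c :: cs)).tail = t := by simp [mySplit, hc, hm]
        have ht : (mySplit cs).tail = t := by simp [hm]
        rw [hmc, ← ht, ih]
        simp [pvScanB, hc]

-- ===== VERDICT (by name: the statement is the Claim_ definition above) =====
theorem detect_indent_py_spec : Claim_equal_detect_indent_py := by
  intro s _
  unfold Spec_detect_indent_py detect_indent_py detect_indent_py_alt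
  rw [splitOn_eq_mySplit]
  show detectIndentLoopA (PySem.List.slice (mySplit s.toList) (some 1) none) = pvScanB s.toList
  have hslice : PySem.List.slice (mySplit s.toList) (some 1) none = (mySplit s.toList).tail := by
    simp [PySem.List.slice_from]
  rw [hslice, main_corr]
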